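-- pv_equiv track=rewrite | github.com/leylabmpi/CoreGenomePrimers | bin/scripts/primer_design.py | seqs2degen
-- ===== SOURCE A (Python) =====
-- IUPAC_R = {
--     ('A',) : 'A',
--     ('C',) : 'C',
--     ('G',) : 'G',
--     ('T',) : 'T',
--     ('A','G') : 'R',
--     ('C','T') : 'Y',
--     ('C','G') : 'S',
--     ('A','T') : 'W',
--     ('G','T') : 'K',
--     ('A','C') : 'M',
--     ('C','G','T') : 'B',
--     ('A','G','T') : 'D',
--     ('A','C','T') : 'H',
--     ('A','C','G') : 'V',
--     ('A','C','G','T') : 'N'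
-- }
--
-- def seqs2degen(seqs):
--     """
--     Convert a list of sequences into a degenerate consensus sequences.
--     Asumming that all of the sequences are aligned (assessing position by position).
--     Returning upper case degen sequence.
--     """
--     if seqs is None:
--         return ''
--     # converting to list of lists (individual chars)
--     seqs = [[y for y in str(x).upper()] for x in seqs]
--     seq_lens = set([len(x) for x in seqs])
--     if not len(seq_lens) == 1:
--         raise KeyError('Sequences are not the same length!')
--     # getting seq variation at each position, then mapping to IUPAC of degen chars
--     degen_seq = ''
--     for i in range(list(seq_lens)[0]):
--         chars = set([seq[i] for seq in seqs])
--         if '-' in chars: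
--             return ''
--         if 'N' in chars:
--             chars = {'A', 'C', 'G', 'T'}
--         try:
--             degen_seq += IUPAC_R[tuple(sorted(set(chars)))]
--         except KeyError:
--             msg = 'Cannot map chars to degen character: {}'
--             raise KeyError(msg.format(','.join(list(chars))))
--     # checking the degen seq_len = input_seqs
--     if len(degen_seq) != list(seq_lens)[0]:
--         raise ValueError('Degenerate seq len != non-degen seqs!')
--     return degen_seq
-- ===== SOURCE B (Python) =====
-- _BIT = {'A': 1, 'C': 2, 'G': 4, 'T': 8, 'N': 15}
-- _CODE = '?ACMGRSVTWYHKDBN'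
--
--
-- def seqs2degen(seqs):
--     """Row-major fold: merge each sequence into per-position base-union masks, resolve at the end."""
--     if seqs is None:
--         return ''
--     rows = [str(x).upper() for x in seqs]
--     if len(set(len(r) for r in rows)) != 1:
--         raise KeyError('Sequences are not the same length!')
--     if any('-' in r for r in rows):
--         return ''
--     masks = [0] * len(rows[0])
--     for r in rows:
--         for i, c in enumerate(r):
--             masks[i] |= _BIT.get(c, 16)
--     out = []
--     for m in masks:
--         if m & 15 == 15:
--             out.append('N')
--         elif m & 16:
--             raise KeyError('Cannot map chars to degen character')
--         else:
--             out.append(_CODE[m])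
--     return ''.join(out)
-- ===== Notes on version B (the rewrite author's own statement) =====
-- stated objective: alternative
-- what changed: A walks the alignment column by column, building a Python set per column, sorting it and looking the sorted tuple up in a 15-entry dict with an early return inside the loop; B works row-major in staged passes: an equal-length check, a whole-row gap scan, then a fold of each sequence into per-position base-union masks (N = all four bases), and only afterwards a resolution pass mapping every accumulated mask to its IUPAC code.
import Mathlib
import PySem

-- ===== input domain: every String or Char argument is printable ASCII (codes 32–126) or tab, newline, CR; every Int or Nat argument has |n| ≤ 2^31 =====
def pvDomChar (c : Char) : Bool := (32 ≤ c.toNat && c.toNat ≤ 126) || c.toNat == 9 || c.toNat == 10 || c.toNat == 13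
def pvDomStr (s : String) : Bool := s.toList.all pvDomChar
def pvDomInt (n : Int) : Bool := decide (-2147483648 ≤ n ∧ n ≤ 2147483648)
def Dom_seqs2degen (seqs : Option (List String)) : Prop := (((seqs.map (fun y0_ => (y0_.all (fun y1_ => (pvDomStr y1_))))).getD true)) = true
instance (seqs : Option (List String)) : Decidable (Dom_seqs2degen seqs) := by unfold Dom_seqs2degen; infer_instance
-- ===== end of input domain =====

-- B replaces A's column-by-column set/sort/dict-lookup (with in-loop early return) by staged row-major
-- passes: an equal-length check, a whole-row gap scan, a fold of every sequence into per-position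
-- base-union masks, and a final resolution pass (objective: alternative).


-- ===== PORT A =====
-- IUPAC_R dict lookup on the sorted tuple of column characters
def pvIupacR (t : List Char) : Option Char :=
  if t = ['A'] then some 'A'
  else if t = ['C'] then some 'C'
  else if t = ['G'] then some 'G'
  else if t = ['T'] then some 'T'
  else if t = ['A','G'] then some 'R'
  else if t = ['C','T'] then some 'Y'
  else if t = ['C','G'] then some 'S'
  else if t = ['A','T'] then some 'W'
  else if t = ['G','T'] then some 'K'
  else if t = ['A','C'] then some 'M'
  else if t = ['C','G','T'] then some 'B'
  else if t = ['A','G','T'] then some 'D'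
  else if t = ['A','C','T'] then some 'H'
  else if t = ['A','C','G'] then some 'V'
  else if t = ['A','C','G','T'] then some 'N'
  else none

-- A's for-loop; `none` models leaving the loop without a normal value
-- (the early `return ''` on a gap column, and the KeyError path — the latter is outside Pre_).
def seqs2degenLoopA (rows : List (List Char)) (acc : String) : List Nat → Option String
  | [] => some acc
  | i :: rest =>
    let chars : PySem.Set Char := PySem.Set.ofList (rows.map (fun r => PySem.List.pyGetD r (i : Int) ' '))
    if PySem.Set.contains chars '-' then none
    else
      let chars2 : PySem.Set Char :=
        if PySem.Set.contains chars 'N' then PySem.Set.ofList ['A', 'C', 'G', 'T'] else chars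
      match pvIupacR (PySem.List.sorted (PySem.Set.ofList chars2) (fun x => x) false) with
      | some c => seqs2degenLoopA rows (acc.push c) rest
      | none => none

def seqs2degen (seqs : Option (List String)) : String :=
  match seqs with
  | none => ""
  | some l =>
    let rows := l.map (fun x => (PySem.Str.upper x).toList)
    let seqLens : PySem.Set Nat := PySem.Set.ofList (rows.map List.length)
    if seqLens.length ≠ 1 then ""   -- raise KeyError('Sequences are not the same length!'), outside Pre_
    else
      let L := List.headD seqLens 0   -- list(seq_lens)[0]
      match seqs2degenLoopA rows "" (List.range L) with
      | none => ""                     -- early `return ''` (or the KeyError path, outside Pre_)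
      | some acc => if PySem.Str.len acc ≠ (L : Int) then "" else acc   -- ValueError path, outside Pre_

-- ===== PORT B =====
-- _BIT.get(c, 16): base-set of one character as a bitmask (A=1 C=2 G=4 T=8, N = all four, other = 16)
def pvBitB (c : Char) : Nat :=
  if c = 'A' then 1 else if c = 'C' then 2 else if c = 'G' then 4
  else if c = 'T' then 8 else if c = 'N' then 15 else 16

-- the string _CODE = '?ACMGRSVTWYHKDBN'
def pvCode : List Char := ['?', 'A', 'C', 'M', 'G', 'R', 'S', 'V', 'T', 'W', 'Y', 'H', 'K', 'D', 'B', 'N']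

-- `for i, c in enumerate(r): masks[i] |= _BIT.get(c, 16)` — whenever this runs, r has the masks'
-- length (the equal-length check passed), so the indexed in-place update is exactly this zipWith
def pvMergeRow (ms : List Nat) (r : List Char) : List Nat :=
  List.zipWith (fun m c => m ||| pvBitB c) ms r

-- the final resolution loop over the masks; `none` models the raised KeyError (outside Pre_)
def pvResolve : List Nat → Option (List Char)
  | [] => some []
  | m :: ms =>
    if m &&& 15 = 15 then (pvResolve ms).map (fun cs => 'N' :: cs)
    else if m &&& 16 ≠ 0 then none
    else (pvResolve ms).map (fun cs => pvCode.getD m '?' :: cs)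

def seqs2degen_alt (seqs : Option (List String)) : String :=
  match seqs with
  | none => ""
  | some l =>
    let rows := l.map (fun x => (PySem.Str.upper x).toList)
    if (PySem.Set.ofList (rows.map List.length)).length ≠ 1 then ""   -- raise KeyError, outside Pre_
    else if rows.any (fun r => r.contains '-') then ""
    else
      let masks := rows.foldl pvMergeRow (List.replicate (rows.headD []).length 0)
      match pvResolve masks with
      | none => ""      -- raise KeyError, outside Pre_
      | some cs => String.ofList cs

-- ===== PRECONDITION & SPEC =====
-- column i of the upper-cased, equal-length rows (the default is never hit under Pre_)
def pvCol (rows : List (List Char)) (i : Nat) : List Char := rows.map (fun r => List.getD r i ' ')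

-- all rows share one length, and every column reached before any gap column contains an 'N'
-- (which makes A emit 'N' whatever else is there) or only A,C,G,T characters
def pvOkB (rows : List (List Char)) : Bool :=
  decide ((PySem.Set.ofList (rows.map List.length)).length = 1) &&
  (List.range (rows.headD []).length).all (fun i =>
    !((List.range (i + 1)).all (fun j => !((pvCol rows j).contains '-'))) ||
    (pvCol rows i).contains 'N' ||
    (pvCol rows i).all (fun c => (['A', 'C', 'G', 'T'] : List Char).contains c))

-- Pre_ excludes exactly the inputs where A raises: an empty list or unequal lengths (KeyError), and an
-- N-free column reached before any gap column containing a character outside A,C,G,T after upper-casing (KeyError).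
def Pre_seqs2degen (seqs : Option (List String)) : Prop :=
  seqs = none ∨ pvOkB ((seqs.getD []).map (fun x => (PySem.Str.upper x).toList)) = true
instance (seqs : Option (List String)) : Decidable (Pre_seqs2degen seqs) := by
  unfold Pre_seqs2degen; infer_instance

def pvWitness_seqs2degen : Option (List String) := some ["ACgt", "AGtt"]

def Spec_seqs2degen (seqs : Option (List String)) (out : String) : Prop := out = seqs2degen_alt seqs
instance (seqs : Option (List String)) (out : String) : Decidable (Spec_seqs2degen seqs out) := by
  unfold Spec_seqs2degen; infer_instance

-- ===== CLAIM (what is proved, stated in full; the proofs are below) =====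
def Claim_equal_seqs2degen : Prop := ∀ (seqs : Option (List String)), Dom_seqs2degen seqs → Pre_seqs2degen seqs → Spec_seqs2degen seqs (seqs2degen seqs)

-- ===== LEMMAS AND PROOFS =====
-- proof-only helpers --
def pvColMask (col : List Char) : Nat := col.foldl (fun m c => m ||| pvBitB c) 0

def pvMask (col : List Char) : Nat :=
  (if 'A' ∈ col then 1 else 0) ||| (if 'C' ∈ col then 2 else 0) |||
  (if 'G' ∈ col then 4 else 0) ||| (if 'T' ∈ col then 8 else 0)

def pvBit (c : Char) : Nat := if c = 'A' then 1 else if c = 'C' then 2 else if c = 'G' then 4 else 8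

-- A's per-column character (the set / sort / dict-lookup pipeline)
def pvAChar (col : List Char) : Option Char :=
  let chars := PySem.Set.ofList col
  let chars2 : PySem.Set Char :=
    if PySem.Set.contains chars 'N' then PySem.Set.ofList ['A', 'C', 'G', 'T'] else chars
  pvIupacR (PySem.List.sorted (PySem.Set.ofList chars2) (fun x => x) false)

theorem and15_or (x y : Nat) (h : x &&& 15 = 15) : (x ||| y) &&& 15 = 15 := by
  apply Nat.eq_of_testBit_eq
  intro i
  have h' := congrArg (fun n => Nat.testBit n i) h
  simp only [Nat.testBit_and, Nat.testBit_or] at h' ⊢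
  cases hb : Nat.testBit 15 i <;> simp_all

theorem foldl_and15 (col : List Char) : ∀ init : Nat, init &&& 15 = 15 →
    (col.foldl (fun m c => m ||| pvBitB c) init) &&& 15 = 15 := by
  induction col with
  | nil => intro init h; simpa using h
  | cons c rest ih => intro init h; exact ih _ (and15_or _ _ h)

theorem foldl_n (col : List Char) (h : 'N' ∈ col) :
    ∀ init : Nat, (col.foldl (fun m c => m ||| pvBitB c) init) &&& 15 = 15 := by
  induction col with
  | nil => simp at h
  | cons c rest ih =>
    intro init
    rcases List.mem_cons.mp h with rfl | hm
    · rw [List.foldl_cons]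
      apply foldl_and15
      rw [show pvBitB 'N' = 15 from rfl, Nat.or_comm]
      exact and15_or 15 init (by decide)
    · exact ih hm _

theorem foldl_acgt (col : List Char) (h : ∀ c ∈ col, c ∈ (['A','C','G','T'] : List Char)) :
    ∀ init : Nat, col.foldl (fun m c => m ||| pvBitB c) init = init ||| pvMask col := by
  induction col with
  | nil => intro init; simp [pvMask]
  | cons c rest ih =>
    intro init
    have hc := h c List.mem_cons_self
    have hrest : ∀ x ∈ rest, x ∈ (['A','C','G','T'] : List Char) :=
      fun x hx => h x (List.mem_cons_of_mem _ hx)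
    have hbb : pvBitB c = pvBit c := by fin_cases hc <;> decide
    rw [List.foldl_cons, hbb, ih hrest, Nat.or_assoc]
    have : pvBit c ||| pvMask rest = pvMask (c :: rest) := by
      fin_cases hc <;>
        (by_cases hA : 'A' ∈ rest <;> by_cases hC : 'C' ∈ rest <;>
         by_cases hG : 'G' ∈ rest <;> by_cases hT : 'T' ∈ rest <;>
         simp [pvMask, pvBit, List.mem_cons, hA, hC, hG, hT])
    rw [this]

theorem sortedSet (col : List Char) (h : ∀ c ∈ col, c ∈ (['A','C','G','T'] : List Char)) :
    PySem.List.sorted (PySem.Set.ofList col) (fun x => x) false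
      = (['A','C','G','T'] : List Char).filter (fun c => decide (c ∈ col)) := by
  apply PySem.List.sorted_eq_of_perm_of_pairwise_lt
  · apply (List.perm_ext_iff_of_nodup (List.Nodup.filter _ (by decide)) (PySem.Set.nodup_ofList col)).mpr
    intro a
    simp only [List.mem_filter, PySem.Set.mem_ofList, decide_eq_true_eq]
    exact ⟨fun ⟨_, ha⟩ => ha, fun ha => ⟨h a ha, ha⟩⟩
  · exact List.Pairwise.filter _ (by decide)

-- per good dash-free column, A's character is B's resolved character
theorem charEq (col : List Char) (hne : col ≠ []) (hnd : '-' ∉ col)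
    (hsub : 'N' ∈ col ∨ ∀ c ∈ col, c ∈ (['A','C','G','T'] : List Char)) :
    pvAChar col = some (if pvColMask col &&& 15 = 15 then 'N' else pvCode.getD (pvColMask col) '?')
      ∧ (pvColMask col &&& 15 ≠ 15 → pvColMask col &&& 16 = 0) := by
  by_cases hN : 'N' ∈ col
  · have h15 : pvColMask col &&& 15 = 15 := foldl_n col hN 0
    have hct : PySem.Set.contains (PySem.Set.ofList col) 'N' = true := by
      rw [PySem.Set.contains_iff, PySem.Set.mem_ofList]; exact hN
    refine ⟨?_, fun h => absurd h15 h⟩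
    rw [if_pos h15]
    simp only [pvAChar, hct, if_true]
    decide
  · have hsub4 := hsub.resolve_left hN
    have hm : pvColMask col = pvMask col := by
      unfold pvColMask; rw [foldl_acgt col hsub4 0, Nat.zero_or]
    have hcf : PySem.Set.contains (PySem.Set.ofList col) 'N' = false :=
      Bool.eq_false_iff.mpr (fun hh =>
        hN ((PySem.Set.mem_ofList _ _).mp ((PySem.Set.contains_iff _ _).mp hh)))
    have hor : 'A' ∈ col ∨ 'C' ∈ col ∨ 'G' ∈ col ∨ 'T' ∈ col := by
      cases col with
      | nil => exact (hne rfl).elim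
      | cons a b =>
        have hc4 := hsub4 a List.mem_cons_self
        have hmm : a ∈ a :: b := List.mem_cons_self
        fin_cases hc4 <;> tauto
    constructor
    · simp only [pvAChar, hcf, Bool.false_eq_true, if_false]
      rw [PySem.Set.ofList_ofList, sortedSet col hsub4, hm]
      by_cases hA : 'A' ∈ col <;> by_cases hC : 'C' ∈ col <;>
        by_cases hG : 'G' ∈ col <;> by_cases hT : 'T' ∈ col <;>
        first
          | (simp [pvMask, hA, hC, hG, hT, pvIupacR, pvCode]; done)
          | tauto
    · intro _
      rw [hm]
      by_cases hA : 'A' ∈ col <;> by_cases hC : 'C' ∈ col <;>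
        by_cases hG : 'G' ∈ col <;> by_cases hT : 'T' ∈ col <;>
        simp [pvMask, hA, hC, hG, hT]

theorem foldRows (rows : List (List Char)) (L : Nat) (hlen : ∀ r ∈ rows, r.length = L) :
    ∀ ms : List Nat, ms.length = L →
      rows.foldl pvMergeRow ms
        = (List.range L).map (fun i => (pvCol rows i).foldl (fun m c => m ||| pvBitB c) (ms.getD i 0)) := by
  induction rows with
  | nil =>
    intro ms hms
    apply List.ext_getElem
    · simp [hms]
    · intro i hi hi2
      simp only [List.foldl_nil, List.getElem_map, List.getElem_range]
      have hiL : i < ms.length := by simpa using hi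
      rw [List.getD_eq_getElem _ _ hiL]
      simp [pvCol]
  | cons r rest ih =>
    intro ms hms
    have hr : r.length = L := hlen r List.mem_cons_self
    have hrest : ∀ x ∈ rest, x.length = L := fun x hx => hlen x (List.mem_cons_of_mem _ hx)
    have hlen2 : (pvMergeRow ms r).length = L := by
      simp [pvMergeRow, hms, hr]
    rw [List.foldl_cons, ih hrest _ hlen2]
    apply List.map_congr_left
    intro i hi
    have hiL : i < L := List.mem_range.mp hi
    have h1 : (pvMergeRow ms r).getD i 0 = ms.getD i 0 ||| pvBitB (r.getD i ' ') := by
      rw [List.getD_eq_getElem _ _ (by omega : i < (pvMergeRow ms r).length)]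
      simp only [pvMergeRow, List.getElem_zipWith]
      rw [List.getD_eq_getElem _ _ (by omega : i < ms.length),
          List.getD_eq_getElem _ _ (by omega : i < r.length)]
    have h2 : pvCol (r :: rest) i = r.getD i ' ' :: pvCol rest i := rfl
    rw [h1, h2, List.foldl_cons]

theorem resolveLen (ms : List Nat) : ∀ cs, pvResolve ms = some cs → cs.length = ms.length := by
  induction ms with
  | nil => intro cs h; simp only [pvResolve, Option.some.injEq] at h; simp [← h]
  | cons m rest ih =>
    intro cs h
    simp only [pvResolve] at h
    split_ifs at h
    all_goals
      first
        | exact Option.noConfusion h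
        | (rw [Option.map_eq_some_iff] at h
           obtain ⟨as, has, rfl⟩ := h
           simp [ih as has])

theorem colNe (rows : List (List Char)) (hne : rows ≠ []) (i : Nat) : pvCol rows i ≠ [] := by
  cases rows with
  | nil => exact (hne rfl).elim
  | cons r rs => simp [pvCol]

theorem loopNoDash (rows : List (List Char)) (L : Nat) (hne : rows ≠ [])
    (hgood : ∀ i < L, 'N' ∈ pvCol rows i ∨ ∀ c ∈ pvCol rows i, c ∈ (['A','C','G','T'] : List Char))
    (hnd : ∀ i < L, '-' ∉ pvCol rows i) :
    ∀ (n k : Nat) (acc : List Char), k + n = L →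
      seqs2degenLoopA rows (String.ofList acc) (List.range' k n)
        = (pvResolve ((List.range' k n).map (fun i => pvColMask (pvCol rows i)))).map
            (fun cs => String.ofList (acc ++ cs)) := by
  intro n
  induction n with
  | zero => intro k acc _; simp [seqs2degenLoopA, pvResolve]
  | succ m ih =>
    intro k acc hkL
    have hk : k < L := by omega
    rw [List.range'_succ]
    have hcol : (rows.map (fun r => PySem.List.pyGetD r ((k : Nat) : Int) ' ')) = pvCol rows k := by
      simp [pvCol]
    simp only [seqs2degenLoopA, List.map_cons, hcol]
    have hsd : PySem.Set.contains (PySem.Set.ofList (pvCol rows k)) '-' = false :=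
      Bool.eq_false_iff.mpr (fun hh =>
        hnd k hk ((PySem.Set.mem_ofList _ _).mp ((PySem.Set.contains_iff _ _).mp hh)))
    rw [hsd]
    simp only [Bool.false_eq_true, if_false]
    have hceq := charEq (pvCol rows k) (colNe rows hne k) (hnd k hk) (hgood k hk)
    have hArw : pvIupacR (PySem.List.sorted (PySem.Set.ofList
        (if PySem.Set.contains (PySem.Set.ofList (pvCol rows k)) 'N' = true
         then PySem.Set.ofList ['A', 'C', 'G', 'T'] else PySem.Set.ofList (pvCol rows k)))
        (fun x => x) false) = pvAChar (pvCol rows k) := rfl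
    rw [hArw, hceq.1]
    have hres : pvResolve (pvColMask (pvCol rows k) :: (List.range' (k+1) m).map (fun i => pvColMask (pvCol rows i)))
        = (pvResolve ((List.range' (k+1) m).map (fun i => pvColMask (pvCol rows i)))).map
            (fun cs => (if pvColMask (pvCol rows k) &&& 15 = 15 then 'N'
                        else pvCode.getD (pvColMask (pvCol rows k)) '?') :: cs) := by
      by_cases h15 : pvColMask (pvCol rows k) &&& 15 = 15
      · simp [pvResolve, h15]
      · have h16 := hceq.2 h15
        simp [pvResolve, h15, h16]
    rw [hres]
    have hpush : (String.ofList acc).push (if pvColMask (pvCol rows k) &&& 15 = 15 then 'N'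
          else pvCode.getD (pvColMask (pvCol rows k)) '?')
        = String.ofList (acc ++ [if pvColMask (pvCol rows k) &&& 15 = 15 then 'N'
          else pvCode.getD (pvColMask (pvCol rows k)) '?']) := by
      apply String.toList_injective; simp
    show seqs2degenLoopA rows ((String.ofList acc).push (if pvColMask (pvCol rows k) &&& 15 = 15 then 'N'
          else pvCode.getD (pvColMask (pvCol rows k)) '?')) (List.range' (k + 1) m) = _
    rw [hpush, ih (k+1) _ (by omega)]
    cases pvResolve ((List.range' (k+1) m).map (fun i => pvColMask (pvCol rows i))) <;>
      simp [List.append_assoc]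

theorem loopDash (rows : List (List Char)) (L : Nat) (hne : rows ≠ [])
    (hpre : ∀ i < L, (∀ j ≤ i, '-' ∉ pvCol rows j) →
      ('N' ∈ pvCol rows i ∨ ∀ c ∈ pvCol rows i, c ∈ (['A','C','G','T'] : List Char))) :
    ∀ (n k : Nat) (acc : String), k + n = L → (∀ j < k, '-' ∉ pvCol rows j) →
      (∃ i, k ≤ i ∧ i < L ∧ '-' ∈ pvCol rows i) →
      seqs2degenLoopA rows acc (List.range' k n) = none := by
  intro n
  induction n with
  | zero =>
    intro k acc hkL _ hex
    obtain ⟨i, h1, h2, _⟩ := hex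
    omega
  | succ m ih =>
    intro k acc hkL hndk hex
    have hk : k < L := by omega
    rw [List.range'_succ]
    have hcol : (rows.map (fun r => PySem.List.pyGetD r ((k : Nat) : Int) ' ')) = pvCol rows k := by
      simp [pvCol]
    simp only [seqs2degenLoopA, hcol]
    by_cases hd : '-' ∈ pvCol rows k
    · have hsd : PySem.Set.contains (PySem.Set.ofList (pvCol rows k)) '-' = true := by
        rw [PySem.Set.contains_iff, PySem.Set.mem_ofList]; exact hd
      rw [hsd]
      simp
    · have hsd : PySem.Set.contains (PySem.Set.ofList (pvCol rows k)) '-' = false :=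
        Bool.eq_false_iff.mpr (fun hh =>
          hd ((PySem.Set.mem_ofList _ _).mp ((PySem.Set.contains_iff _ _).mp hh)))
      rw [hsd]
      simp only [Bool.false_eq_true, if_false]
      have hndk' : ∀ j ≤ k, '-' ∉ pvCol rows j := by
        intro j hj
        rcases Nat.lt_or_eq_of_le hj with hlt | rfl
        · exact hndk j hlt
        · exact hd
      have hceq := charEq (pvCol rows k) (colNe rows hne k) hd (hpre k hk hndk')
      have hArw : pvIupacR (PySem.List.sorted (PySem.Set.ofList
          (if PySem.Set.contains (PySem.Set.ofList (pvCol rows k)) 'N' = true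
           then PySem.Set.ofList ['A', 'C', 'G', 'T'] else PySem.Set.ofList (pvCol rows k)))
          (fun x => x) false) = pvAChar (pvCol rows k) := rfl
      rw [hArw, hceq.1]
      show seqs2degenLoopA rows (acc.push _) (List.range' (k + 1) m) = none
      apply ih (k+1) _ (by omega)
      · intro j hj
        exact hndk' j (by omega)
      · obtain ⟨i, h1, h2, h3⟩ := hex
        refine ⟨i, ?_, h2, h3⟩
        rcases Nat.lt_or_eq_of_le h1 with hlt | rfl
        · omega
        · exact absurd h3 hd

theorem pvOkB_spec (rows : List (List Char)) (h : pvOkB rows = true) :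
    (PySem.Set.ofList (rows.map List.length)).length = 1 ∧
    ∀ i < (rows.headD []).length, (∀ j ≤ i, '-' ∉ pvCol rows j) →
      ('N' ∈ pvCol rows i ∨ ∀ c ∈ pvCol rows i, c ∈ (['A','C','G','T'] : List Char)) := by
  unfold pvOkB at h
  rw [Bool.and_eq_true] at h
  obtain ⟨h1, h2⟩ := h
  refine ⟨of_decide_eq_true h1, ?_⟩
  intro i hi hnd
  rw [List.all_eq_true] at h2
  have hi2 := h2 i (List.mem_range.mpr hi)
  rw [Bool.or_eq_true, Bool.or_eq_true] at hi2
  rcases hi2 with (hcontra | hN) | hall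
  · exfalso
    rw [Bool.not_eq_eq_eq_not, Bool.not_true, List.all_eq_false] at hcontra
    obtain ⟨j, hj, hjj⟩ := hcontra
    have hjm : '-' ∈ pvCol rows j := by
      by_contra hnm
      simp [List.contains_eq_mem, hnm] at hjj
    exact hnd j (Nat.lt_succ_iff.mp (List.mem_range.mp hj)) hjm
  · left
    rwa [List.contains_eq_mem, decide_eq_true_eq] at hN
  · right
    intro c hc
    rw [List.all_eq_true] at hall
    have := hall c hc
    rwa [List.contains_eq_mem, decide_eq_true_eq] at this

theorem lensOne (xs : List Nat) (h : (PySem.Set.ofList xs).length = 1) :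
    xs ≠ [] ∧ (∀ x ∈ xs, x = xs.headD 0) ∧ List.headD (PySem.Set.ofList xs) 0 = xs.headD 0 := by
  obtain ⟨a, ha⟩ := List.length_eq_one_iff.mp h
  have hmem : ∀ x, x ∈ xs ↔ x = a := by
    intro x
    rw [← PySem.Set.mem_ofList xs x, ha, List.mem_singleton]
  cases xs with
  | nil => exact absurd ((hmem a).mpr rfl) (by simp)
  | cons y ys =>
    have hy : y = a := (hmem y).mp List.mem_cons_self
    refine ⟨by simp, ?_, ?_⟩
    · intro x hx
      rw [(hmem x).mp hx, List.headD_cons, hy]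
    · rw [ha, List.headD_cons, List.headD_cons, hy]

theorem headLen (rows : List (List Char)) (hne : rows ≠ []) :
    (rows.map List.length).headD 0 = (rows.headD []).length := by
  cases rows with
  | nil => exact (hne rfl).elim
  | cons r rs => rfl

-- ===== VERDICT (by name: the statement is the Claim_ definition above) =====
theorem seqs2degen_spec : Claim_equal_seqs2degen := by
  intro seqs _ hpre
  unfold Spec_seqs2degen
  cases seqs with
  | none => rfl
  | some l =>
    rcases hpre with h | h
    · simp at h
    · simp only [Option.getD_some] at h
      obtain ⟨hlen1, hcols⟩ := pvOkB_spec _ h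
      obtain ⟨hneL, hall, hhead⟩ := lensOne _ hlen1
      set rows := l.map (fun x => (PySem.Str.upper x).toList) with hrows
      have hne : rows ≠ [] := by
        intro hc; rw [hc] at hneL; exact hneL rfl
      have hlenall : ∀ r ∈ rows, r.length = (rows.headD []).length := by
        intro r hr
        have := hall r.length (List.mem_map_of_mem hr)
        rw [this, headLen rows hne]
      have hLhead : List.headD (PySem.Set.ofList (rows.map List.length)) 0 = (rows.headD []).length := by
        rw [hhead, headLen rows hne]
      unfold seqs2degen seqs2degen_alt
      simp only [← hrows, hLhead]
      rw [if_neg (by simp [hlen1]), if_neg (by simp [hlen1])]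
      by_cases hdash : rows.any (fun r => r.contains '-') = true
      · rw [if_pos hdash]
        obtain ⟨r, hr, hcont⟩ := List.any_eq_true.mp hdash
        rw [List.contains_eq_mem, decide_eq_true_eq] at hcont
        obtain ⟨i, hi, hig⟩ := List.mem_iff_getElem.mp hcont
        have hiL : i < (rows.headD []).length := hlenall r hr ▸ hi
        have hdc : '-' ∈ pvCol rows i := by
          apply List.mem_map.mpr
          exact ⟨r, hr, by rw [List.getD_eq_getElem _ _ hi, hig]⟩
        have hloop := loopDash rows (rows.headD []).length hne hcols
            (rows.headD []).length 0 "" (by omega) (by omega) ⟨i, by omega, hiL, hdc⟩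
        rw [List.range_eq_range', hloop]
      · rw [if_neg hdash]
        have hnd : ∀ i < (rows.headD []).length, '-' ∉ pvCol rows i := by
          intro i hiL hmem
          obtain ⟨r, hr, hget⟩ := List.mem_map.mp hmem
          apply hdash
          apply List.any_eq_true.mpr
          refine ⟨r, hr, ?_⟩
          rw [List.contains_eq_mem, decide_eq_true_eq]
          rw [List.getD_eq_getElem _ _ (by rw [hlenall r hr]; exact hiL)] at hget
          exact hget ▸ List.getElem_mem _
        have hgood : ∀ i < (rows.headD []).length,
            'N' ∈ pvCol rows i ∨ ∀ c ∈ pvCol rows i, c ∈ (['A','C','G','T'] : List Char) := by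
          intro i hiL
          exact hcols i hiL (fun j hj => hnd j (by omega))
        have hmasks : rows.foldl pvMergeRow (List.replicate (rows.headD []).length 0)
            = (List.range (rows.headD []).length).map (fun i => pvColMask (pvCol rows i)) := by
          rw [foldRows rows (rows.headD []).length hlenall _ (by simp)]
          apply List.map_congr_left
          intro i _
          have h0 : (List.replicate (rows.headD []).length (0 : Nat)).getD i 0 = 0 := by
            simp only [List.getD, List.getElem?_replicate]
            split <;> simp
          rw [h0]
          rfl
        have hloop := loopNoDash rows (rows.headD []).length hne hgood hnd
            (rows.headD []).length 0 [] (by omega)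
        rw [List.range_eq_range', hmasks, List.range_eq_range']
        have hempty : ("" : String) = String.ofList [] := rfl
        rw [hempty, hloop]
        cases hres : pvResolve ((List.range' 0 (rows.headD []).length).map
            (fun i => pvColMask (pvCol rows i))) with
        | none => rfl
        | some cs =>
          have hlen := resolveLen _ _ hres
          simp only [List.length_map, List.length_range'] at hlen
          simp only [Option.map_some, List.nil_append]
          rw [if_neg]
          simp [PySem.Str.len_eq, hlen]
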